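-- pv_equiv track=rewrite | github.com/KangPvP/TakazuPy | ProjetTakuzu/takuzu_regle_verif.py | verif_ligne_colonne_boucle
-- ===== SOURCE A (Python) =====
-- def verif_ligne_colonne_boucle(g):
--     """Fonction en lien avec verif_ligne_colonne(g)"""
--
--     ltest = []
--     for l in g:
--         if l not in ltest:
--             ltest.append(l)
--         else:
--             return False
--
--     return True
-- ===== SOURCE B (Python) =====
-- def verif_ligne_colonne_boucle(g):
--     rows = sorted(g)
--     for prev, cur in zip(rows, rows[1:]):
--         if cur == prev:
--             return False
--     return True
-- ===== Notes on version B (the rewrite author's own statement) =====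
-- stated objective: alternative
-- what changed: Replaces A's per-row membership scan against a growing seen-list with sorting a copy of the rows once and a single pass checking adjacent pairs for equality.
import Mathlib
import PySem

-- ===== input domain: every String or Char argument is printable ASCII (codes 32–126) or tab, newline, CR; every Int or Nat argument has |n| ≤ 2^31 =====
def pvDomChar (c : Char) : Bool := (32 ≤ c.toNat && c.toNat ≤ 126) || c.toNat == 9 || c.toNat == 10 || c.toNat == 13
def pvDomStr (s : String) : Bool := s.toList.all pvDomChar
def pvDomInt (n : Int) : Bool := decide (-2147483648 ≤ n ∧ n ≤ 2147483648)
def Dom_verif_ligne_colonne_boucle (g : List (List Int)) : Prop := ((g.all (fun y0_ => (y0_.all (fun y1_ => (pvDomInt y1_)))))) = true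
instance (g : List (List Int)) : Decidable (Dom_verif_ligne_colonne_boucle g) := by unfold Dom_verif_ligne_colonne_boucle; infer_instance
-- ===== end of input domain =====

-- B sorts a copy of the rows and checks adjacent pairs for equality, instead of A's growing seen-list membership scan; return values proved equal (alternative decomposition).


-- ===== PORT A =====
-- A's loop: ltest accumulator, append unseen rows, return False on a repeat
def pvLoopA : List (List Int) → List (List Int) → Bool
  | [], _ => true
  | l :: rest, ltest =>
      if ¬ (l ∈ ltest) then pvLoopA rest (ltest ++ [l]) else false

def verif_ligne_colonne_boucle (g : List (List Int)) : Bool :=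
  pvLoopA g []

-- ===== PORT B =====
-- rows = sorted(g); for prev, cur in zip(rows, rows[1:]): if cur == prev: return False; return True
def verif_ligne_colonne_boucle_alt (g : List (List Int)) : Bool :=
  let rows := PySem.List.sorted g (fun x => x) false
  (rows.zip (PySem.List.slice rows (some 1) none)).all (fun pc => !(pc.2 == pc.1))

-- ===== PRECONDITION & SPEC =====
def Spec_verif_ligne_colonne_boucle (g : List (List Int)) (out : Bool) : Prop := out = verif_ligne_colonne_boucle_alt g
instance (g : List (List Int)) (out : Bool) : Decidable (Spec_verif_ligne_colonne_boucle g out) := by unfold Spec_verif_ligne_colonne_boucle; infer_instance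

-- ===== CLAIM (what is proved, stated in full; the proofs are below) =====
def Claim_equal_verif_ligne_colonne_boucle : Prop := ∀ (g : List (List Int)), Dom_verif_ligne_colonne_boucle g → Spec_verif_ligne_colonne_boucle g (verif_ligne_colonne_boucle g)

-- ===== LEMMAS AND PROOFS =====

-- A's loop returns true iff the remaining rows are distinct and disjoint from the seen-list
theorem pvLoopA_eq_true_iff (g ltest : List (List Int)) :
    pvLoopA g ltest = true ↔ g.Nodup ∧ ∀ x ∈ g, x ∉ ltest := by
  induction g generalizing ltest with
  | nil => simp [pvLoopA]
  | cons l rest ih =>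
      by_cases h : l ∈ ltest
      · simp [pvLoopA, h]
      · rw [show pvLoopA (l :: rest) ltest = pvLoopA rest (ltest ++ [l]) from by
          simp [pvLoopA, h], ih]
        constructor
        · rintro ⟨hn, hall⟩
          have hl : l ∉ rest := fun hm => (hall l hm) (by simp)
          refine ⟨List.nodup_cons.mpr ⟨hl, hn⟩, ?_⟩
          intro x hx
          rcases List.mem_cons.mp hx with rfl | hx
          · exact h
          · exact fun hc => (hall x hx) (List.mem_append_left _ hc)
        · rintro ⟨hn, hall⟩
          obtain ⟨hl, hn'⟩ := List.nodup_cons.mp hn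
          refine ⟨hn', fun x hx hc => ?_⟩
          rcases List.mem_append.mp hc with hc | hc
          · exact (hall x (List.mem_cons_of_mem _ hx)) hc
          · simp only [List.mem_singleton] at hc
            subst hc
            exact hl hx

-- adjacent-distinct on a ≤-sorted list is the same as Nodup
theorem pvAdj_iff_nodup (s : List (List Int)) (hs : s.Pairwise (· ≤ ·)) :
    ((s.zip s.tail).all (fun pc => !(pc.2 == pc.1)) = true) ↔ s.Nodup := by
  induction s with
  | nil => simp
  | cons x t ih =>
      cases t with
      | nil => simp
      | cons y u =>
          obtain ⟨hx, hrest⟩ := List.pairwise_cons.mp hs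
          have hxy : x ≤ y := hx y List.mem_cons_self
          have hyu : ∀ z ∈ u, y ≤ z := fun z hz => (List.pairwise_cons.mp hrest).1 z hz
          have ihr := ih hrest
          simp only [List.tail_cons, List.zip_cons_cons, List.all_cons, Bool.and_eq_true] at ihr ⊢
          rw [ihr]
          constructor
          · rintro ⟨h1, hnd⟩
            have hne : y ≠ x := by simpa using h1
            refine List.nodup_cons.mpr ⟨?_, hnd⟩
            intro hmem
            rcases List.mem_cons.mp hmem with rfl | hmem
            · exact hne rfl
            · exact hne (le_antisymm (hyu x hmem) hxy)
          · intro hnd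
            obtain ⟨hnm, hnd'⟩ := List.nodup_cons.mp hnd
            refine ⟨?_, hnd'⟩
            simp only [Bool.not_eq_eq_eq_not, Bool.not_true, beq_eq_false_iff_ne, ne_eq]
            exact fun he => hnm (by rw [he]; exact List.mem_cons_self)

theorem verif_eq (g : List (List Int)) :
    verif_ligne_colonne_boucle g = verif_ligne_colonne_boucle_alt g := by
  have hA : verif_ligne_colonne_boucle g = true ↔ g.Nodup := by
    simp [verif_ligne_colonne_boucle, pvLoopA_eq_true_iff]
  have hpw : (PySem.List.sorted g (fun x => x) false).Pairwise (· ≤ ·) := by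
    have h := PySem.List.sorted_pairwise (κ := List Int) g (fun x => x)
    convert h using 2
  have hperm : (PySem.List.sorted g (fun x => x) false).Perm g := by
    have h := PySem.List.sorted_perm (κ := List Int) g (fun x => x) false
    convert h using 2
  have hB : verif_ligne_colonne_boucle_alt g = true ↔ g.Nodup := by
    rw [verif_ligne_colonne_boucle_alt]
    simp only [PySem.List.slice_from_one]
    rw [pvAdj_iff_nodup _ hpw]
    exact hperm.nodup_iff
  cases hb : verif_ligne_colonne_boucle_alt g
  · cases ha : verif_ligne_colonne_boucle g
    · rfl
    · exact absurd (hB.mpr (hA.mp ha)) (by simp [hb])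
  · exact hA.mpr (hB.mp hb)

-- ===== VERDICT (by name: the statement is the Claim_ definition above) =====
theorem verif_ligne_colonne_boucle_spec : Claim_equal_verif_ligne_colonne_boucle := by
  intro g _
  exact verif_eq g
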